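-- pv_equiv track=rewrite | github.com/waynegault/ancestry | action7_inbox.py | _find_latest_messages
-- ===== SOURCE A (Python) =====
-- from typing import Any, Literal, Optional, cast
--
-- def _find_latest_messages(
--     context_messages: list[dict], my_pid_lower: str
-- ) -> tuple[Optional[dict], Optional[dict]]:
--     """Find latest IN and OUT messages from context."""
--     latest_ctx_in: Optional[dict] = None
--     latest_ctx_out: Optional[dict] = None
--
--     for msg in reversed(context_messages):
--         author_lower = msg.get("author", "")
--         if author_lower != my_pid_lower and latest_ctx_in is None:
--             latest_ctx_in = msg
--         elif author_lower == my_pid_lower and latest_ctx_out is None: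
--             latest_ctx_out = msg
--         if latest_ctx_in and latest_ctx_out:
--             break
--
--     return latest_ctx_in, latest_ctx_out
-- ===== SOURCE B (Python) =====
-- from typing import Optional
--
-- def _find_latest_messages(
--     context_messages: list[dict], my_pid_lower: str
-- ) -> tuple[Optional[dict], Optional[dict]]:
--     """Find latest IN and OUT messages from context (single forward pass)."""
--     latest_in: Optional[dict] = None
--     latest_out: Optional[dict] = None
--     for msg in context_messages:
--         if msg.get("author", "") != my_pid_lower:
--             latest_in = msg
--         else:
--             latest_out = msg
--     return latest_in, latest_out
-- ===== Notes on version B (the rewrite author's own statement) =====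
-- stated objective: simpler
-- what changed: Single forward pass that unconditionally overwrites latest_in/latest_out per message, instead of scanning the reversed list with None-guards and a truthiness-based early break.
import Mathlib
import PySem

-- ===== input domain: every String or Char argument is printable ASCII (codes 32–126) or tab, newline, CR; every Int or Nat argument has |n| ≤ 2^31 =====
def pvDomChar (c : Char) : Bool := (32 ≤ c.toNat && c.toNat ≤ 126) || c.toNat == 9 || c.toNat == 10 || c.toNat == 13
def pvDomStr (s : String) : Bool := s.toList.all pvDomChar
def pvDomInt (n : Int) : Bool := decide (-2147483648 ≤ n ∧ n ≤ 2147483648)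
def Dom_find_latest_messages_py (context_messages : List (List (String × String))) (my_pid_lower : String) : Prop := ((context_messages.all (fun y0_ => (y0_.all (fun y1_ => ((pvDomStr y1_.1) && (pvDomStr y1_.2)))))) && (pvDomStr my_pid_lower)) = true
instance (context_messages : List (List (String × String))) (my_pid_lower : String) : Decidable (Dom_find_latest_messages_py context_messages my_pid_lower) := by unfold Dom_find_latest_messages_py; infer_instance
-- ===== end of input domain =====

-- B replaces A's reversed scan with None-guards and a truthiness break by a single
-- forward pass that unconditionally overwrites each slot (objective: simpler).

-- ===== PORT A =====
-- msg.get("author", "") (dict → assoc list, first match)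
def pvAuthor (m : List (String × String)) : String :=
  PySem.Dict.getD (PySem.Dict.mk m) "author" ""

-- Python truthiness of Optional[dict]: None and {} are falsy
def pvTruthy (o : Option (List (String × String))) : Bool :=
  match o with
  | none => false
  | some m => !m.isEmpty

-- the reversed-loop body of A, with the early 'break'
def findLatestGoA (my : String) :
    List (List (String × String)) →
    Option (List (String × String)) → Option (List (String × String)) →
    (Option (List (String × String))) × (Option (List (String × String)))
  | [], li, lo => (li, lo)
  | m :: rest, li, lo =>
    let a := pvAuthor m
    let li' := if a ≠ my ∧ li = none then some m else li
    let lo' := if ¬(a ≠ my ∧ li = none) ∧ a = my ∧ lo = none then some m else lo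
    if pvTruthy li' && pvTruthy lo' then (li', lo')
    else findLatestGoA my rest li' lo'

def find_latest_messages_py (context_messages : List (List (String × String))) (my_pid_lower : String) : (Option (List (String × String))) × (Option (List (String × String))) :=
  findLatestGoA my_pid_lower context_messages.reverse none none

-- ===== PORT B =====
def find_latest_messages_py_alt (context_messages : List (List (String × String))) (my_pid_lower : String) : (Option (List (String × String))) × (Option (List (String × String))) :=
  context_messages.foldl
    (fun s m =>
      if pvAuthor m ≠ my_pid_lower then (some m, s.2) else (s.1, some m))
    (none, none)

-- ===== PRECONDITION & SPEC =====
def Spec_find_latest_messages_py (context_messages : List (List (String × String))) (my_pid_lower : String) (out : (Option (List (String × String))) × (Option (List (String × String)))) : Prop := out = find_latest_messages_py_alt context_messages my_pid_lower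
instance (context_messages : List (List (String × String))) (my_pid_lower : String) (out : (Option (List (String × String))) × (Option (List (String × String)))) : Decidable (Spec_find_latest_messages_py context_messages my_pid_lower out) := by unfold Spec_find_latest_messages_py; infer_instance

-- ===== CLAIM (what is proved, stated in full; the proofs are below) =====
def Claim_equal_find_latest_messages_py : Prop := ∀ (context_messages : List (List (String × String))) (my_pid_lower : String), Dom_find_latest_messages_py context_messages my_pid_lower → Spec_find_latest_messages_py context_messages my_pid_lower (find_latest_messages_py context_messages my_pid_lower)

-- ===== LEMMAS AND PROOFS =====
def pIn (my : String) (m : List (String × String)) : Bool := pvAuthor m != my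
def pOut (my : String) (m : List (String × String)) : Bool := pvAuthor m == my

-- A's loop returns the first match from the front of the (already reversed) list,
-- seeded by the incoming accumulators
theorem goA_eq (my : String) (r : List (List (String × String)))
    (li lo : Option (List (String × String))) :
    findLatestGoA my r li lo =
      (li.or (r.find? (pIn my)), lo.or (r.find? (pOut my))) := by
  induction r generalizing li lo with
  | nil => simp [findLatestGoA]
  | cons m rest ih =>
    have h1 : ((if pvAuthor m ≠ my ∧ li = none then some m else li).or
          (rest.find? (pIn my))) = li.or ((m :: rest).find? (pIn my)) := by
      rcases li with _ | x <;> by_cases hp : pvAuthor m = my <;>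
        simp [pIn, hp]
    have h2 : ((if ¬(pvAuthor m ≠ my ∧ li = none) ∧ pvAuthor m = my ∧ lo = none
          then some m else lo).or (rest.find? (pOut my)))
        = lo.or ((m :: rest).find? (pOut my)) := by
      rcases lo with _ | x <;> rcases li with _ | y <;>
        by_cases hp : pvAuthor m = my <;> simp [pOut, hp]
    simp only [findLatestGoA]
    rw [← h1, ← h2]
    cases hli : (if pvAuthor m ≠ my ∧ li = none then some m else li) <;>
      cases hlo : (if ¬(pvAuthor m ≠ my ∧ li = none) ∧ pvAuthor m = my ∧ lo = none
          then some m else lo) <;>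
      simp [pvTruthy, ih]

-- B's fold accumulates the last match of each kind, i.e. the first match of the reverse
theorem foldB_eq (my : String) (L : List (List (String × String)))
    (li lo : Option (List (String × String))) :
    L.foldl (fun s m =>
        if pvAuthor m ≠ my then (some m, s.2) else (s.1, some m)) (li, lo) =
      ((L.reverse.find? (pIn my)).or li, (L.reverse.find? (pOut my)).or lo) := by
  induction L generalizing li lo with
  | nil => simp
  | cons m rest ih =>
    simp only [List.foldl_cons]
    by_cases hp : pvAuthor m = my
    · rw [if_neg (by simp [hp]), ih]
      simp [List.find?_append, pIn, pOut, hp]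
    · rw [if_pos hp, ih]
      simp [List.find?_append, pIn, pOut, hp]

-- ===== VERDICT (by name: the statement is the Claim_ definition above) =====
theorem find_latest_messages_py_spec : Claim_equal_find_latest_messages_py := by
  intro ctx my _
  unfold Spec_find_latest_messages_py find_latest_messages_py find_latest_messages_py_alt
  rw [goA_eq, foldB_eq]
  simp
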